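-- pv_equiv track=rewrite | github.com/MatthewNewell006/python_examples | src/coding_challenges/coding_challenges_part_1_1.py | remove_even_values
-- ===== SOURCE A (Python) =====
-- def remove_even_values(dictionary):
--     removal_list = []
--     for key in dictionary:
--         if isinstance(dictionary[key], int):
--             if dictionary[key] % 2 == 0:
--                 removal_list.append(key)
--
--     for key in removal_list:
--         dictionary.pop(key)
--
--     return dictionary
-- ===== SOURCE B (Python) =====
-- def remove_even_values(dictionary):
--     kept = {k: v for k, v in dictionary.items()
--             if not (isinstance(v, int) and v % 2 == 0)}
--     dictionary.clear()
--     dictionary.update(kept)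
--     return dictionary
-- ===== Notes on version B (the rewrite author's own statement) =====
-- stated objective: simpler
-- what changed: B builds the complement dict of surviving entries in one comprehension and replaces the contents wholesale (clear+update, preserving object identity), instead of A's collect-keys-then-pop two-loop removal.
import Mathlib
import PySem

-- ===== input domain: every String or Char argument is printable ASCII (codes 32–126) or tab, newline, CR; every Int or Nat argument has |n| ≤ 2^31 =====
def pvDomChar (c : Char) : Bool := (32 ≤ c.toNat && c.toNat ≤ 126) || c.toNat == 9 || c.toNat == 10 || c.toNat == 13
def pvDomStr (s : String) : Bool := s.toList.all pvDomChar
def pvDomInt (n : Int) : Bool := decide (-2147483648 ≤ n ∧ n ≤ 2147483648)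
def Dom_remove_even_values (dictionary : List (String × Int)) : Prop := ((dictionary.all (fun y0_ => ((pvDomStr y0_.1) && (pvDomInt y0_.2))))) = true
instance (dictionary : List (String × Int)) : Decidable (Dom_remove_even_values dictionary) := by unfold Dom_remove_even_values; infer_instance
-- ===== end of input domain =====

-- B replaces A's collect-keys-then-pop two-loop removal by one comprehension of the
-- surviving entries (then clear+update in place); return values agree, and both
-- mutate the argument dict in place to the same final contents.

-- ===== PORT A =====
-- 'for key in dictionary' walks the keys in insertion order; 'dictionary[key]' is the
-- lookup (always succeeds: the key comes from the dict itself); isinstance(v, int) is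
-- always true on the Int-valued domain, so the branch reduces to the parity test.
def remove_even_values (dictionary : List (String × Int)) : List (String × Int) :=
  let removal_list : List String :=
    dictionary.foldl (fun acc kv =>
      match PySem.Dict.get? (PySem.Dict.mk dictionary) kv.1 with
      | some v => if PySem.Int.mod v 2 == 0 then acc ++ [kv.1] else acc
      | none => acc) []
  removal_list.foldl (fun dd k => (PySem.Dict.erase (PySem.Dict.mk dd) k).items) dictionary

-- ===== PORT B =====
-- the comprehension keeps the surviving entries in order; clear()+update(kept) makes
-- the dict's contents exactly that list, which is also the returned value.
def remove_even_values_alt (dictionary : List (String × Int)) : List (String × Int) :=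
  dictionary.filter (fun kv => !(PySem.Int.mod kv.2 2 == 0))

-- ===== PRECONDITION & SPEC =====
-- Pre_ excludes association lists with duplicate keys: those do not represent a Python
-- dict (A's parameter), so A's behaviour on them is not defined by the source at all.
def Pre_remove_even_values (dictionary : List (String × Int)) : Prop :=
  (dictionary.map Prod.fst).Nodup
instance (dictionary : List (String × Int)) : Decidable (Pre_remove_even_values dictionary) := by unfold Pre_remove_even_values; infer_instance
def pvWitness_remove_even_values : (List (String × Int)) := [("a", 2), ("b", 3), ("c", -4)]

def Spec_remove_even_values (dictionary : List (String × Int)) (out : List (String × Int)) : Prop := out = remove_even_values_alt dictionary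
instance (dictionary : List (String × Int)) (out : List (String × Int)) : Decidable (Spec_remove_even_values dictionary out) := by unfold Spec_remove_even_values; infer_instance

-- ===== CLAIM (what is proved, stated in full; the proofs are below) =====
def Claim_equal_remove_even_values : Prop := ∀ (dictionary : List (String × Int)), Dom_remove_even_values dictionary → Pre_remove_even_values dictionary → Spec_remove_even_values dictionary (remove_even_values dictionary)

-- ===== LEMMAS AND PROOFS =====

-- the first loop collects exactly the keys of the even-valued entries, in order
theorem removal_list_eq (d : List (String × Int))
    (h : (d.map Prod.fst).Nodup) :
    d.foldl (fun acc kv =>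
      match PySem.Dict.get? (PySem.Dict.mk d) kv.1 with
      | some v => if PySem.Int.mod v 2 == 0 then acc ++ [kv.1] else acc
      | none => acc) [] =
    (d.filter (fun kv => PySem.Int.mod kv.2 2 == 0)).map Prod.fst := by
  rw [PySem.List.foldl_congr_mem
    (g := fun acc kv => if PySem.Int.mod kv.2 2 == 0 then acc ++ [kv.1] else acc)]
  · exact PySem.List.foldl_append_if _ _ _ _
  · intro acc kv hkv
    have hget : (PySem.Dict.mk d).get? kv.1 = some kv.2 := by
      apply PySem.Dict.get?_of_mem_items
      · simpa using hkv
      · simpa [PySem.Dict.keys] using h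
    rw [hget]

-- the pop loop is a fold of erase, i.e. keeps exactly the entries whose key is not listed
theorem foldl_erase_eq (ks : List String) (d : List (String × Int)) :
    ks.foldl (fun dd k => (PySem.Dict.erase (PySem.Dict.mk dd) k).items) d =
    d.filter (fun p => decide (p.1 ∉ ks)) := by
  induction ks generalizing d with
  | nil => simp
  | cons k t ih =>
    simp only [List.foldl_cons]
    rw [show (PySem.Dict.erase (PySem.Dict.mk d) k).items
          = d.filter (fun p => !(p.1 == k)) from rfl, ih, List.filter_filter]
    apply List.filter_congr
    intro p _
    by_cases h1 : p.1 = k <;> simp [List.mem_cons, h1]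

-- ===== VERDICT (by name: the statement is the Claim_ definition above) =====
theorem remove_even_values_spec : Claim_equal_remove_even_values := by
  intro d _ hpre
  unfold Spec_remove_even_values remove_even_values remove_even_values_alt
  rw [removal_list_eq d hpre, foldl_erase_eq]
  apply List.filter_congr
  intro p hp
  have hmem : decide (p.1 ∈ (d.filter (fun kv => PySem.Int.mod kv.2 2 == 0)).map Prod.fst)
      = (PySem.Int.mod p.2 2 == 0) := by
    rcases Bool.eq_false_or_eq_true (PySem.Int.mod p.2 2 == 0) with hc | hc
    · rw [hc]
      apply decide_eq_true
      exact List.mem_map.mpr ⟨p, List.mem_filter.mpr ⟨hp, hc⟩, rfl⟩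
    · rw [hc]
      apply decide_eq_false
      intro hin
      obtain ⟨q, hq, hq1⟩ := List.mem_map.mp hin
      have hqd : q ∈ d := (List.mem_filter.mp hq).1
      have hqp : q = p := List.inj_on_of_nodup_map hpre hqd hp hq1
      rw [hqp] at hq
      rw [(List.mem_filter.mp hq).2] at hc
      simp at hc
  rw [decide_not, hmem]
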